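-- pv_equiv track=rewrite | github.com/ronniejay22/Knot-APP | Knot/backend/app/services/integrations/yelp.py | _convert_price_range_to_yelp
-- ===== SOURCE A (Python) =====
-- def _convert_price_range_to_yelp(min_cents: int, max_cents: int) -> str:
--     """
--     Convert budget in cents to Yelp price filter string.
--
--     Yelp uses levels 1-4:
--         1 ($)    = Under $15    → under 1500 cents
--         2 ($$)   = $15-$40      → 1500-4000 cents
--         3 ($$$)  = $40-$80      → 4000-8000 cents
--         4 ($$$$) = Above $80    → over 8000 cents
--
--     Returns comma-separated price levels that overlap with the budget range.
--     """
--     # Price level thresholds (level, min_cents, max_cents)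
--     levels = [
--         (1, 0, 1500),
--         (2, 1500, 4000),
--         (3, 4000, 8000),
--         (4, 8000, 100000),
--     ]
--
--     matching = []
--     for level, level_min, level_max in levels:
--         # Include level if budget range overlaps with level range
--         if min_cents < level_max and max_cents > level_min:
--             matching.append(str(level))
--
--     return ",".join(matching) if matching else ""
-- ===== SOURCE B (Python) =====
-- def _bisect_right(a, x):
--     lo, hi = 0, len(a)
--     while lo < hi:
--         mid = (lo + hi) // 2
--         if x < a[mid]:
--             hi = mid
--         else:
--             lo = mid + 1
--     return lo
--
--
-- def _bisect_left(a, x):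
--     lo, hi = 0, len(a)
--     while lo < hi:
--         mid = (lo + hi) // 2
--         if a[mid] < x:
--             lo = mid + 1
--         else:
--             hi = mid
--     return lo
--
--
-- def _convert_price_range_to_yelp(min_cents: int, max_cents: int) -> str:
--     # Levels are a sorted contiguous partition, so matching levels form a
--     # contiguous run: locate its endpoints by binary search on the bounds.
--     uppers = (1500, 4000, 8000, 100000)
--     lowers = (0, 1500, 4000, 8000)
--     lo = _bisect_right(uppers, min_cents)          # first level with min_cents < upper
--     hi = _bisect_left(lowers, max_cents) - 1       # last level with max_cents > lower
--     return ",".join(str(i + 1) for i in range(lo, hi + 1))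
-- ===== Notes on version B (the rewrite author's own statement) =====
-- stated objective: alternative
-- what changed: A linearly scans all four price levels testing range overlap; B exploits that the levels are a sorted contiguous partition, finds the endpoints of the contiguous run of matching levels with two hand-written binary searches (bisect_right on the uppers, bisect_left on the lowers), and joins that run directly.
import Mathlib
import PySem

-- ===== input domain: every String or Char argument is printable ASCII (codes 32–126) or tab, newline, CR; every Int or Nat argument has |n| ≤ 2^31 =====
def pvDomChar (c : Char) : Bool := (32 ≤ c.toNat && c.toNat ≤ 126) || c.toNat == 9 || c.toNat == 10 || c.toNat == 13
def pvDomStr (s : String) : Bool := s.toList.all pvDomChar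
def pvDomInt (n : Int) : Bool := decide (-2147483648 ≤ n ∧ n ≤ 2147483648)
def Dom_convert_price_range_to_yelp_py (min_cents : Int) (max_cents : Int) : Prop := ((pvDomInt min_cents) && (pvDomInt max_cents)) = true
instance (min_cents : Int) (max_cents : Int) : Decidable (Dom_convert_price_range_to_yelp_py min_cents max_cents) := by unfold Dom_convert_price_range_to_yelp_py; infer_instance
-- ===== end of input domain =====

-- B replaces A's linear overlap scan with binary searches for the two run endpoints; objective: alternative.


-- ===== PORT A =====
def convert_price_range_to_yelp_py (min_cents : Int) (max_cents : Int) : String :=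
  let levels : List (Int × Int × Int) := [(1, 0, 1500), (2, 1500, 4000), (3, 4000, 8000), (4, 8000, 100000)]
  let matching : List String := levels.foldl
    (fun acc lvl =>
      if min_cents < lvl.2.2 && max_cents > lvl.2.1 then acc ++ [PySem.Int.toStr lvl.1] else acc) []
  if matching ≠ [] then PySem.Str.join "," matching else ""

-- ===== PORT B =====
-- hand-written binary searches, as in Source B
def pyBisectRight (a : List Int) (x : Int) (lo hi : Nat) : Nat :=
  if _h : lo < hi then
    let mid := (lo + hi) / 2
    if x < a.getD mid 0 then pyBisectRight a x lo mid else pyBisectRight a x (mid + 1) hi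
  else lo
termination_by hi - lo
decreasing_by all_goals omega

def pyBisectLeft (a : List Int) (x : Int) (lo hi : Nat) : Nat :=
  if _h : lo < hi then
    let mid := (lo + hi) / 2
    if a.getD mid 0 < x then pyBisectLeft a x (mid + 1) hi else pyBisectLeft a x lo mid
  else lo
termination_by hi - lo
decreasing_by all_goals omega

def convert_price_range_to_yelp_py_alt (min_cents : Int) (max_cents : Int) : String :=
  let uppers : List Int := [1500, 4000, 8000, 100000]
  let lowers : List Int := [0, 1500, 4000, 8000]
  let lo : Int := (pyBisectRight uppers min_cents 0 uppers.length : Nat)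
  let hi : Int := (pyBisectLeft lowers max_cents 0 lowers.length : Nat) - 1
  PySem.Str.join "," ((PySem.List.pyRange lo (hi + 1) 1).map (fun i => PySem.Int.toStr (i + 1)))

-- ===== PRECONDITION & SPEC =====
def Spec_convert_price_range_to_yelp_py (min_cents : Int) (max_cents : Int) (out : String) : Prop := out = convert_price_range_to_yelp_py_alt min_cents max_cents
instance (min_cents : Int) (max_cents : Int) (out : String) : Decidable (Spec_convert_price_range_to_yelp_py min_cents max_cents out) := by unfold Spec_convert_price_range_to_yelp_py; infer_instance

-- ===== CLAIM (what is proved, stated in full; the proofs are below) =====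
def Claim_equal_convert_price_range_to_yelp_py : Prop := ∀ (min_cents : Int) (max_cents : Int), Dom_convert_price_range_to_yelp_py min_cents max_cents → Spec_convert_price_range_to_yelp_py min_cents max_cents (convert_price_range_to_yelp_py min_cents max_cents)

-- ===== LEMMAS AND PROOFS =====

-- ===== VERDICT (by name: the statement is the Claim_ definition above) =====
-- step lemmas: one unfolding of each reachable binary-search call on a 4-element table
lemma bR_term (a : List Int) (x : Int) (lo : Nat) : pyBisectRight a x lo lo = lo := by
  rw [pyBisectRight]; simp

lemma bR01 (a : List Int) (x : Int) : pyBisectRight a x 0 1 = if x < a.getD 0 0 then 0 else 1 := by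
  rw [pyBisectRight]; norm_num [bR_term]

lemma bR02 (a : List Int) (x : Int) :
    pyBisectRight a x 0 2 = if x < a.getD 1 0 then (if x < a.getD 0 0 then 0 else 1) else 2 := by
  rw [pyBisectRight]; norm_num [bR01, bR_term]

lemma bR34 (a : List Int) (x : Int) : pyBisectRight a x 3 4 = if x < a.getD 3 0 then 3 else 4 := by
  rw [pyBisectRight]; norm_num [bR_term]

lemma bR04 (a : List Int) (x : Int) :
    pyBisectRight a x 0 4 =
      if x < a.getD 2 0 then (if x < a.getD 1 0 then (if x < a.getD 0 0 then 0 else 1) else 2)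
      else (if x < a.getD 3 0 then 3 else 4) := by
  rw [pyBisectRight]; norm_num [bR02, bR34]

lemma bL_term (a : List Int) (x : Int) (lo : Nat) : pyBisectLeft a x lo lo = lo := by
  rw [pyBisectLeft]; simp

lemma bL01 (a : List Int) (x : Int) : pyBisectLeft a x 0 1 = if a.getD 0 0 < x then 1 else 0 := by
  rw [pyBisectLeft]; norm_num [bL_term]

lemma bL02 (a : List Int) (x : Int) :
    pyBisectLeft a x 0 2 = if a.getD 1 0 < x then 2 else (if a.getD 0 0 < x then 1 else 0) := by
  rw [pyBisectLeft]; norm_num [bL01, bL_term]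

lemma bL34 (a : List Int) (x : Int) : pyBisectLeft a x 3 4 = if a.getD 3 0 < x then 4 else 3 := by
  rw [pyBisectLeft]; norm_num [bL_term]

lemma bL04 (a : List Int) (x : Int) :
    pyBisectLeft a x 0 4 =
      if a.getD 2 0 < x then (if a.getD 3 0 < x then 4 else 3)
      else (if a.getD 1 0 < x then 2 else (if a.getD 0 0 < x then 1 else 0)) := by
  rw [pyBisectLeft]; norm_num [bL02, bL34]

set_option maxHeartbeats 2000000 in
theorem convert_price_range_to_yelp_py_spec : Claim_equal_convert_price_range_to_yelp_py := by
  intro mn mx _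
  unfold Spec_convert_price_range_to_yelp_py
  unfold convert_price_range_to_yelp_py convert_price_range_to_yelp_py_alt
  simp only [List.length_cons, List.length_nil, Nat.reduceAdd]
  rw [bR04, bL04]
  simp only [List.getD, List.getElem?_cons_zero, List.getElem?_cons_succ, Option.getD_some, List.foldl]
  by_cases h1 : mn < 1500 <;> by_cases h2 : mn < 4000 <;> by_cases h3 : mn < 8000 <;>
    by_cases h4 : mn < 100000 <;> by_cases g1 : (0 : Int) < mx <;> by_cases g2 : (1500 : Int) < mx <;>
    by_cases g3 : (4000 : Int) < mx <;> by_cases g4 : (8000 : Int) < mx <;>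
    first
      | omega
      | (simp only [h1, h2, h3, h4, g1, g2, g3, g4, gt_iff_lt, decide_true, decide_false,
          Bool.true_and, Bool.false_and, Bool.and_true, Bool.and_false, if_true, if_false,
          Bool.false_eq_true, ite_true, ite_false, ne_eq, reduceCtorEq, not_false_eq_true,
          not_true_eq_false, List.cons_ne_self, List.nil_append, List.cons_append,
          List.append_nil] <;> rfl)
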